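-- pv_equiv track=rewrite | github.com/KhuzeevB/Module_2_6 | module_2_6.py | gen_password
-- ===== SOURCE A (Python) =====
-- def gen_password(n):
--     password = ""
--     for i in range(1,n):
--         for j in range(i + 1, n + 1):
--             summ = i + j
--             if n % summ ==0:
--                 password += f"{i}{j}"
--     return password
-- ===== SOURCE B (Python) =====
-- def gen_password(n):
--     divs = [d for d in range(3, n + 1) if n % d == 0]
--     return "".join(f"{i}{d - i}"
--                    for i in range(1, (n + 1) // 2)
--                    for d in divs
--                    if d > 2 * i)
-- ===== Notes on version B (the rewrite author's own statement) =====
-- stated objective: faster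
-- what changed: B precomputes the list of divisors of n once and, for each i, emits a pair only per matching divisor d = i + j, replacing A's nested scan over all (i, j) pairs and its quadratic string concatenation with a single join.
import Mathlib
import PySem

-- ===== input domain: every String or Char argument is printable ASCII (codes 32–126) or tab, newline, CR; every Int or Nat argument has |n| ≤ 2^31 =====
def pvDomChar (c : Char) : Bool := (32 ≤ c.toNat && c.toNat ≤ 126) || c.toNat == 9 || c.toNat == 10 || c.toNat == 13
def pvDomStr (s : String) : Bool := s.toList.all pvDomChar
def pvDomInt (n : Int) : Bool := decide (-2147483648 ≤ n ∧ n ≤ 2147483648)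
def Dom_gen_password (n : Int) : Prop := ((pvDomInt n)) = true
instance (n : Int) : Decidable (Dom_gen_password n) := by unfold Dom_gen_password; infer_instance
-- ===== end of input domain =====

-- B precomputes the divisor list of n once and pairs each i only with divisors d = i + j,
-- instead of A's full nested scan over all pairs (i, j); same output with far fewer inner iterations.

-- ===== PORT A =====
def gen_password (n : Int) : String :=
  (PySem.List.pyRange 1 n 1).foldl (fun password i =>
    (PySem.List.pyRange (i+1) (n+1) 1).foldl (fun password j =>
      let summ := i + j
      if PySem.Int.mod n summ == 0 then password ++ (PySem.Int.toStr i ++ PySem.Int.toStr j)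
      else password) password) ""

-- ===== PORT B =====
def gen_password_alt (n : Int) : String :=
  let divs := (PySem.List.pyRange 3 (n+1) 1).filter (fun d => PySem.Int.mod n d == 0)
  PySem.Str.join "" ((PySem.List.pyRange 1 (PySem.Int.floordiv (n+1) 2) 1).flatMap (fun i =>
    (divs.filter (fun d => 2*i < d)).map (fun d => PySem.Int.toStr i ++ PySem.Int.toStr (d-i))))

-- ===== PRECONDITION & SPEC =====
def Spec_gen_password (n : Int) (out : String) : Prop := out = gen_password_alt n
instance (n : Int) (out : String) : Decidable (Spec_gen_password n out) := by unfold Spec_gen_password; infer_instance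

-- ===== CLAIM (what is proved, stated in full; the proofs are below) =====
def Claim_equal_gen_password : Prop := ∀ (n : Int), Dom_gen_password n → Spec_gen_password n (gen_password n)

-- ===== LEMMAS AND PROOFS =====

/-- Concatenation of a list of strings (the common normal form of both loops). -/
def strcat (l : List String) : String := l.foldl (· ++ ·) ""

lemma foldl_str_shift (l : List String) (a : String) :
    l.foldl (· ++ ·) a = a ++ strcat l := by
  induction l generalizing a with
  | nil => simp [strcat]
  | cons y t ih =>
    rw [List.foldl_cons, ih (a ++ y)]
    rw [show strcat (y :: t) = (y :: t).foldl (· ++ ·) "" from rfl]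
    rw [List.foldl_cons, ih ("" ++ y)]
    simp [String.append_assoc]

lemma strcat_cons (x : String) (l : List String) : strcat (x :: l) = x ++ strcat l := by
  rw [show strcat (x :: l) = (x :: l).foldl (· ++ ·) "" from rfl, List.foldl_cons,
    foldl_str_shift]
  simp

lemma foldl_str_append {α : Type} (l : List α) (g : α → String) (s : String) :
    l.foldl (fun acc x => acc ++ g x) s = s ++ strcat (l.map g) := by
  induction l generalizing s with
  | nil => simp [strcat]
  | cons x t ih => simp [ih, strcat_cons, String.append_assoc]

lemma foldl_str_append_if {α : Type} (l : List α) (p : α → Bool) (f : α → String) (s : String) :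
    l.foldl (fun acc x => if p x then acc ++ f x else acc) s
      = s ++ strcat ((l.filter p).map f) := by
  induction l generalizing s with
  | nil => simp [strcat]
  | cons x t ih =>
    by_cases h : p x <;> simp [h, ih, strcat_cons, String.append_assoc]

lemma strcat_append (l₁ l₂ : List String) : strcat (l₁ ++ l₂) = strcat l₁ ++ strcat l₂ := by
  induction l₁ with
  | nil => simp [strcat]
  | cons x t ih => simp [strcat_cons, ih, String.append_assoc]

lemma join_empty_sep (l : List String) : PySem.Str.join "" l = strcat l := by
  induction l with
  | nil => rfl
  | cons x t ih =>
    rw [strcat_cons, ← ih]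
    cases t with
    | nil => simp [PySem.Str.join, PySem.Chars.join, List.intercalate]
    | cons y u => simp [PySem.Str.join, PySem.Chars.join_cons_cons]

lemma strcat_flatMap {α : Type} (l : List α) (g : α → List String) :
    strcat (l.flatMap g) = strcat (l.map (fun x => strcat (g x))) := by
  induction l with
  | nil => rfl
  | cons x t ih => simp [List.flatMap_cons, strcat_append, strcat_cons, ih]

/-- The pieces A's inner loop appends for a given `i`. -/
def pcsA (n i : Int) : List String :=
  ((PySem.List.pyRange (i+1) (n+1) 1).filter (fun j => PySem.Int.mod n (i+j) == 0)).map
    (fun j => PySem.Int.toStr i ++ PySem.Int.toStr j)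

/-- The pieces B's inner generator yields for a given `i`. -/
def pcsB (n i : Int) : List String :=
  (((PySem.List.pyRange 3 (n+1) 1).filter (fun d => PySem.Int.mod n d == 0)).filter
      (fun d => 2*i < d)).map (fun d => PySem.Int.toStr i ++ PySem.Int.toStr (d-i))

lemma genA_normal (n : Int) :
    gen_password n = strcat ((PySem.List.pyRange 1 n 1).flatMap (pcsA n)) := by
  unfold gen_password
  have h : (fun (password : String) (i : Int) =>
      (PySem.List.pyRange (i+1) (n+1) 1).foldl (fun password j =>
        let summ := i + j
        if PySem.Int.mod n summ == 0 then password ++ (PySem.Int.toStr i ++ PySem.Int.toStr j)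
        else password) password)
      = fun (password : String) (i : Int) => password ++ strcat (pcsA n i) := by
    funext password i
    exact foldl_str_append_if _ _ _ _
  rw [h, foldl_str_append, strcat_flatMap]
  simp

lemma genB_normal (n : Int) :
    gen_password_alt n
      = strcat ((PySem.List.pyRange 1 (PySem.Int.floordiv (n+1) 2) 1).flatMap (pcsB n)) := by
  unfold gen_password_alt
  rw [join_empty_sep]
  rfl

/-- `d > n` is never a divisor of a positive `n`. -/
lemma mod_big (n d : Int) (hn : 0 < n) (hd : n < d) : (PySem.Int.mod n d == 0) = false := by
  rw [PySem.Int.mod_eq_emod_of_pos (by omega), Int.emod_eq_of_lt (by omega) hd]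
  simp; omega

/-- A's inner range `[i+1, n+1)` is the divisor-candidate range `[2i+1, n+i+1)` shifted by `i`. -/
lemma pyRange_shift (n i : Int) :
    PySem.List.pyRange (i+1) (n+1) 1
      = (PySem.List.pyRange (2*i+1) (n+i+1) 1).map (fun d => d - i) := by
  rw [PySem.List.pyRange_one, PySem.List.pyRange_one, List.map_map]
  have he : ((n+1) - (i+1)).toNat = ((n+i+1) - (2*i+1)).toNat := by omega
  rw [he]
  exact List.map_congr_left (fun k _ => by simp; omega)

lemma pcs_eq (n i : Int) (hn : 3 ≤ n) (hi : 1 ≤ i) (h2i : 2*i + 1 ≤ n) :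
    pcsA n i = pcsB n i := by
  unfold pcsA pcsB
  rw [pyRange_shift, List.filter_map, List.map_map]
  have hf : ((fun j => PySem.Int.mod n (i+j) == 0) ∘ (fun d => d - i))
      = fun d => PySem.Int.mod n d == 0 := by
    funext d; simp only [Function.comp]
    rw [show i + (d - i) = d by ring]
  rw [hf, List.filter_filter]
  rw [PySem.List.pyRange_one_append 3 (2*i+1) (n+1) (by omega) (by omega),
      PySem.List.pyRange_one_append (2*i+1) (n+1) (n+i+1) (by omega) (by omega),
      List.filter_append, List.filter_append]
  have h1 : (PySem.List.pyRange 3 (2*i+1) 1).filter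
      (fun a => (2*i < a : Bool) && (PySem.Int.mod n a == 0)) = [] := by
    rw [List.filter_eq_nil_iff]
    intro a ha
    rw [PySem.List.mem_pyRange_one] at ha
    simp only [Bool.and_eq_true, decide_eq_true_eq]
    rintro ⟨h, -⟩; omega
  have h2 : (PySem.List.pyRange (n+1) (n+i+1) 1).filter
      (fun d => PySem.Int.mod n d == 0) = [] := by
    rw [List.filter_eq_nil_iff]
    intro a ha
    rw [PySem.List.mem_pyRange_one] at ha
    rw [mod_big n a (by omega) (by omega)]
    simp
  have h3 : (PySem.List.pyRange (2*i+1) (n+1) 1).filter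
      (fun a => (2*i < a : Bool) && (PySem.Int.mod n a == 0))
      = (PySem.List.pyRange (2*i+1) (n+1) 1).filter (fun d => PySem.Int.mod n d == 0) := by
    apply List.filter_congr
    intro a ha
    rw [PySem.List.mem_pyRange_one] at ha
    have h' : 2*i < a := by omega
    simp [h']
  rw [h1, h2, h3]
  simp

/-- For `2i ≥ n` A's inner loop finds no divisor: every sum `i + j` exceeds `n`. -/
lemma pcsA_tail (n i : Int) (hn : 3 ≤ n) (h2i : n ≤ 2*i) :
    pcsA n i = [] := by
  unfold pcsA
  rw [List.map_eq_nil_iff, List.filter_eq_nil_iff]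
  intro j hj
  rw [PySem.List.mem_pyRange_one] at hj
  rw [mod_big n (i+j) (by omega) (by omega)]
  simp

lemma main_eq (n : Int) : gen_password n = gen_password_alt n := by
  rcases lt_trichotomy n 2 with hlt | heq | hgt
  · -- n ≤ 1: both loops are empty
    rw [genA_normal, genB_normal,
        PySem.List.pyRange_one_eq_nil (show n ≤ 1 by omega),
        PySem.List.pyRange_one_eq_nil (show PySem.Int.floordiv (n+1) 2 ≤ 1 by
          have := (PySem.Int.floordiv_lt_iff_lt_mul (a := n+1) (b := 2) (q := 2)
            (by omega)).mpr (by omega)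
          omega)]
    rfl
  · subst heq; decide
  · -- n ≥ 3
    have hn : 3 ≤ n := by omega
    set m := PySem.Int.floordiv (n+1) 2 with hmdef
    have hm := (PySem.Int.floordiv_eq_iff_of_pos (a := n+1) (b := 2) (q := m)
      (by omega)).mp hmdef.symm
    rw [genA_normal, genB_normal,
        PySem.List.pyRange_one_append 1 m n (by omega) (by omega),
        List.flatMap_append]
    have htail : (PySem.List.pyRange m n 1).flatMap (pcsA n) = [] := by
      rw [List.flatMap_eq_nil_iff]
      intro i hi
      rw [PySem.List.mem_pyRange_one] at hi
      exact pcsA_tail n i hn (by omega)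
    have hhead : (PySem.List.pyRange 1 m 1).flatMap (pcsA n)
        = (PySem.List.pyRange 1 m 1).flatMap (pcsB n) := by
      apply List.flatMap_congr
      intro i hi
      rw [PySem.List.mem_pyRange_one] at hi
      exact pcs_eq n i hn (by omega) (by omega)
    rw [htail, hhead, List.append_nil]

-- ===== VERDICT (by name: the statement is the Claim_ definition above) =====
theorem gen_password_spec : Claim_equal_gen_password := by
  intro n _
  unfold Spec_gen_password
  exact main_eq n
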